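-- pv_equiv track=rewrite | github.com/SubrataG99/BasicPythonCodes | ArrayRotation.py | LeftRot
-- ===== SOURCE A (Python) =====
-- def LeftRot(arr, d):
--     temp = []
--     n = len(arr)
--     d = d%n
--     i = d
--     while (i != (d-1)%n):
--         temp.append(arr[i])
--         i = (i+1)%n
--     temp.append(arr[i])
--     return temp
-- ===== SOURCE B (Python) =====
-- def LeftRot(arr, d):
--     n = len(arr)
--     d = d % n
--     return list(arr[d:] + arr[:d])
-- ===== Notes on version B (the rewrite author's own statement) =====
-- stated objective: simpler
-- what changed: Replaces the modular-index while loop that appends one element at a time with a single slice-and-concatenate expression arr[d%n:] + arr[:d%n].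
import Mathlib
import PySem

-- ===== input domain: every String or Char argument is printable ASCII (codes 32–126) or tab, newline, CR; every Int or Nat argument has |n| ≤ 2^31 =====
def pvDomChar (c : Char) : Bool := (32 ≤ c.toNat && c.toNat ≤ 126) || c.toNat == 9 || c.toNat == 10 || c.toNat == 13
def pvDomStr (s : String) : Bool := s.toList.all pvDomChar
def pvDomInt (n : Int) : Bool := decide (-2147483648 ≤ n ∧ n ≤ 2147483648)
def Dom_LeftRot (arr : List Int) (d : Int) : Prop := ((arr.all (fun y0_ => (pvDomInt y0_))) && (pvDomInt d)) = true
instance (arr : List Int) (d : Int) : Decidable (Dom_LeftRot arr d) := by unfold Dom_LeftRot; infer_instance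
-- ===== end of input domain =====

-- B replaces A's modular-index while loop with a single slice-and-concatenate expression; same O(n) cost.

-- ===== PORT A =====
-- A's while loop: condition tested before the body, i steps by (i+1)%n, state (temp, i).
-- Fuel = len(arr) suffices: the loop runs exactly n-1 iterations before i reaches (d-1)%n.
def LeftRotLoop (arr : List Int) (n stop : Int) : Nat → Int → List Int → List Int × Int
  | 0, i, temp => (temp, i)
  | Nat.succ f, i, temp =>
      if i = stop then (temp, i)
      else LeftRotLoop arr n stop f (PySem.Int.mod (i + 1) n) (temp ++ [PySem.List.pyGetD arr i 0])

def LeftRot (arr : List Int) (d : Int) : List Int :=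
  let n : Int := arr.length
  if n = 0 then []   -- Python's d%n raises ZeroDivisionError here; excluded by Pre_LeftRot
  else
    let d' := PySem.Int.mod d n
    let p := LeftRotLoop arr n (PySem.Int.mod (d' - 1) n) arr.length d' []
    p.1 ++ [PySem.List.pyGetD arr p.2 0]

-- ===== PORT B =====
def LeftRot_alt (arr : List Int) (d : Int) : List Int :=
  let n : Int := arr.length
  if n = 0 then []   -- Python's d%n raises ZeroDivisionError here; excluded by Pre_LeftRot
  else
    let d' := PySem.Int.mod d n
    PySem.List.slice arr (some d') none ++ PySem.List.slice arr none (some d')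

-- ===== PRECONDITION & SPEC =====
-- Pre_ excludes exactly the empty list, on which both A and B raise ZeroDivisionError at d % len(arr).
def Pre_LeftRot (arr : List Int) (d : Int) : Prop := arr ≠ []
instance (arr : List Int) (d : Int) : Decidable (Pre_LeftRot arr d) := by unfold Pre_LeftRot; infer_instance
def pvWitness_LeftRot : List Int × Int := ([1, 2, 3, 4], 2)

def Spec_LeftRot (arr : List Int) (d : Int) (out : List Int) : Prop := out = LeftRot_alt arr d
instance (arr : List Int) (d : Int) (out : List Int) : Decidable (Spec_LeftRot arr d out) := by unfold Spec_LeftRot; infer_instance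

-- ===== CLAIM (what is proved, stated in full; the proofs are below) =====
def Claim_equal_LeftRot : Prop := ∀ (arr : List Int) (d : Int), Dom_LeftRot arr d → Pre_LeftRot arr d → Spec_LeftRot arr d (LeftRot arr d)

-- ===== LEMMAS AND PROOFS =====

-- A's loop, started s steps (mod n) before `stop`, appends the s elements arr[(i+j)%n], j = 0..s-1,
-- and halts at `stop`, provided it has more than s units of fuel.
lemma loopA_spec (arr : List Int) (stop : Int)
    (hs0 : 0 ≤ stop) (hsn : stop < arr.length) :
    ∀ (s fuel : Nat) (i : Int) (temp : List Int),
      0 ≤ i → i < arr.length →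
      PySem.Int.mod (stop - i) arr.length = (s : Int) →
      s < fuel →
      LeftRotLoop arr arr.length stop fuel i temp =
        (temp ++ (List.range s).map
            (fun (j : Nat) => PySem.List.pyGetD arr (PySem.Int.mod (i + (j : Int)) arr.length) 0), stop) := by
  intro s
  induction s with
  | zero =>
    intro fuel i temp hi0 hin hmod hf
    have hn : (0 : Int) < arr.length := lt_of_le_of_lt hi0 hin
    rw [PySem.Int.mod_eq_emod_of_pos hn] at hmod
    have hdvd : (arr.length : Int) ∣ (stop - i) := Int.dvd_of_emod_eq_zero (by simpa using hmod)
    have hie : stop = i := by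
      have := Int.eq_zero_of_abs_lt_dvd hdvd (by rw [abs_lt]; omega)
      omega
    cases fuel with
    | zero => omega
    | succ f => simp [LeftRotLoop, hie]
  | succ s ih =>
    intro fuel i temp hi0 hin hmod hf
    have hn : (0 : Int) < arr.length := lt_of_le_of_lt hi0 hin
    rw [PySem.Int.mod_eq_emod_of_pos hn] at hmod
    have hne : i ≠ stop := by
      intro h; rw [h] at hmod; simp at hmod; omega
    have hsb : ((s : Int) + 1) < arr.length := by
      have := Int.emod_lt_of_pos (stop - i) hn; omega
    cases fuel with
    | zero => omega
    | succ f =>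
      have hi' : PySem.Int.mod (i + 1) (arr.length : Int) = (i + 1) % arr.length :=
        PySem.Int.mod_eq_emod_of_pos hn
      have h0' : 0 ≤ (i + 1) % (arr.length : Int) := Int.emod_nonneg _ (by omega)
      have h1' : (i + 1) % (arr.length : Int) < arr.length := Int.emod_lt_of_pos _ hn
      have hmod' : PySem.Int.mod (stop - (i + 1) % arr.length) arr.length = (s : Int) := by
        rw [PySem.Int.mod_eq_emod_of_pos hn]
        have e1 : (stop - (i + 1) % (arr.length : Int)) % arr.length
             = (stop - (i + 1)) % arr.length := by
          conv_lhs => rw [Int.sub_emod]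
          conv_rhs => rw [Int.sub_emod]
          rw [Int.emod_emod_of_dvd _ dvd_rfl]
        rw [e1]
        have hq := Int.emod_add_mul_ediv (stop - i) (arr.length : Int)
        rw [hmod] at hq
        have e2 : stop - (i + 1) = (s : Int) + (arr.length : Int) * ((stop - i) / arr.length) := by
          omega
        rw [e2, Int.add_mul_emod_self_left]
        exact Int.emod_eq_of_lt (by omega) (by omega)
      rw [show LeftRotLoop arr (arr.length : Int) stop (f+1) i temp
            = LeftRotLoop arr arr.length stop f (PySem.Int.mod (i + 1) arr.length)
                (temp ++ [PySem.List.pyGetD arr i 0]) by simp [LeftRotLoop, hne]]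
      rw [hi', ih f _ _ h0' h1' (by rw [← hi'] at hmod' ⊢; exact hmod') (by omega)]
      rw [List.append_assoc]
      congr 1
      congr 1
      rw [List.range_succ_eq_map, List.map_cons, List.map_map, List.singleton_append]
      congr 1
      · simp [PySem.Int.mod_eq_emod_of_pos hn, Int.emod_eq_of_lt hi0 hin]
      · apply List.map_congr_left
        intro j hj
        simp only [Function.comp]
        congr 1
        rw [PySem.Int.mod_eq_emod_of_pos hn, PySem.Int.mod_eq_emod_of_pos hn, Int.emod_add_emod]
        congr 1
        push_cast
        ring

-- Reading arr at (d'+j)%n for j = 0..n-1 is exactly drop d' ++ take d'.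
lemma rot_map (arr : List Int) (d' : Int) (h0 : 0 ≤ d') (h1 : d' < arr.length) :
    (List.range arr.length).map
        (fun (j : Nat) => PySem.List.pyGetD arr (PySem.Int.mod (d' + (j : Int)) arr.length) 0)
      = arr.drop d'.toNat ++ arr.take d'.toNat := by
  have hn : (0 : Int) < arr.length := by omega
  apply List.ext_getElem
  · simp; omega
  · intro m hm hm2
    simp only [List.getElem_map, List.getElem_range]
    rw [PySem.Int.mod_eq_emod_of_pos hn]
    have hmn : m < arr.length := by simpa using hm
    set k := d'.toNat with hk
    by_cases hc : m < arr.length - k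
    · have he : (d' + (m : Int)) % arr.length = ((k + m : Nat) : Int) := by
        rw [Int.emod_eq_of_lt (by omega) (by omega)]; omega
      rw [he, PySem.List.pyGetD_natCast, List.getD_eq_getElem _ _ (by omega),
          List.getElem_append_left (by simp; omega)]
      simp only [List.getElem_drop]
      rfl
    · have he : (d' + (m : Int)) % arr.length = ((m - (arr.length - k) : Nat) : Int) := by
        rw [← Int.sub_emod_right, Int.emod_eq_of_lt (by omega) (by omega)]
        omega
      rw [he, PySem.List.pyGetD_natCast, List.getD_eq_getElem _ _ (by omega),
          List.getElem_append_right (by rw [List.length_drop]; omega)]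
      simp only [List.getElem_take, List.length_drop]
      rfl

theorem LeftRot_spec : Claim_equal_LeftRot := by
  intro arr d _hdom hpre
  unfold Spec_LeftRot
  have hlen : 0 < arr.length := List.length_pos_iff.mpr hpre
  have hn : (0 : Int) < arr.length := by exact_mod_cast hlen
  have hne : (arr.length : Int) ≠ 0 := by omega
  simp only [LeftRot, LeftRot_alt, hne, if_false]
  set d' := PySem.Int.mod d (arr.length : Int) with hd'
  have hd0 : 0 ≤ d' := PySem.Int.mod_nonneg d hn
  have hd1 : d' < arr.length := PySem.Int.mod_lt d hn
  set stop := PySem.Int.mod (d' - 1) (arr.length : Int) with hstop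
  have hst0 : 0 ≤ stop := PySem.Int.mod_nonneg _ hn
  have hst1 : stop < arr.length := PySem.Int.mod_lt _ hn
  have hstop_e : stop = (d' - 1) % arr.length := by
    rw [hstop, PySem.Int.mod_eq_emod_of_pos hn]
  have hsmod : PySem.Int.mod (stop - d') (arr.length : Int) = ((arr.length - 1 : Nat) : Int) := by
    rw [PySem.Int.mod_eq_emod_of_pos hn, hstop_e]
    have e1 : ((d' - 1) % (arr.length : Int) - d') % arr.length = (d' - 1 - d') % arr.length := by
      conv_lhs => rw [Int.sub_emod]
      conv_rhs => rw [Int.sub_emod]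
      rw [Int.emod_emod_of_dvd _ dvd_rfl]
    rw [e1, show d' - 1 - d' = ((arr.length : Int) - 1) - arr.length by ring,
        Int.sub_emod_right, Int.emod_eq_of_lt (by omega) (by omega)]
    omega
  rw [loopA_spec arr stop hst0 hst1 (arr.length - 1) arr.length d' [] hd0 hd1 hsmod (by omega)]
  simp only [List.nil_append]
  have hg : PySem.List.pyGetD arr stop 0
      = PySem.List.pyGetD arr (PySem.Int.mod (d' + ((arr.length - 1 : Nat) : Int)) arr.length) 0 := by
    congr 1
    rw [PySem.Int.mod_eq_emod_of_pos hn, hstop_e,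
        show d' + ((arr.length - 1 : Nat) : Int) = (d' - 1) + (arr.length : Int) * 1 by omega,
        Int.add_mul_emod_self_left]
  have hsplit : (List.range arr.length).map
        (fun (j : Nat) => PySem.List.pyGetD arr (PySem.Int.mod (d' + (j : Int)) arr.length) 0)
      = (List.range (arr.length - 1)).map
          (fun (j : Nat) => PySem.List.pyGetD arr (PySem.Int.mod (d' + (j : Int)) arr.length) 0)
        ++ [PySem.List.pyGetD arr (PySem.Int.mod (d' + ((arr.length - 1 : Nat) : Int)) arr.length) 0] := by
    rw [show List.range arr.length = List.range ((arr.length - 1) + 1) from by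
          rw [Nat.sub_add_cancel hlen],
        List.range_succ, List.map_append, List.map_singleton]
  rw [hg, ← hsplit, rot_map arr d' hd0 hd1,
      PySem.List.slice_from arr hd0, PySem.List.slice_to arr hd0]
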